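-- pv_equiv track=rewrite | github.com/yejinee/Algorithm | Baekjoon/1018_Chessgame.py | MakeWhitechess
-- ===== SOURCE A (Python) =====
-- def MakeWhitechess(A):
--     whitechess=[]
--     for index, rowstring in enumerate(A):
--         white=[]
--         if index%2==0:
--             current_color='W'
--         else:
--             current_color='B'
--
--         for value in rowstring:
--             if value==current_color:
--                 white.append(0)
--             else:
--                 white.append(1)
--
--             if current_color=='W':
--                 current_color='B'
--             else:
--                 current_color='W'
--         whitechess.append(white)
--     return whitechess
-- ===== SOURCE B (Python) =====
-- def MakeWhitechess(A):
--     out = []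
--     seed = "WB"
--     for row in A:
--         pat = (seed * (len(row) // 2 + 1))[:len(row)]
--         out.append([int(c != p) for c, p in zip(row, pat)])
--         seed = seed[::-1]
--     return out
-- ===== Notes on version B (the rewrite author's own statement) =====
-- stated objective: alternative
-- what changed: Instead of toggling a per-cell color state, B materialises the expected chessboard row as a pattern string by string repetition and slicing ('WB'*k truncated, seed flipped per row) and marks mismatches by zipping the row against that pattern.
import Mathlib
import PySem

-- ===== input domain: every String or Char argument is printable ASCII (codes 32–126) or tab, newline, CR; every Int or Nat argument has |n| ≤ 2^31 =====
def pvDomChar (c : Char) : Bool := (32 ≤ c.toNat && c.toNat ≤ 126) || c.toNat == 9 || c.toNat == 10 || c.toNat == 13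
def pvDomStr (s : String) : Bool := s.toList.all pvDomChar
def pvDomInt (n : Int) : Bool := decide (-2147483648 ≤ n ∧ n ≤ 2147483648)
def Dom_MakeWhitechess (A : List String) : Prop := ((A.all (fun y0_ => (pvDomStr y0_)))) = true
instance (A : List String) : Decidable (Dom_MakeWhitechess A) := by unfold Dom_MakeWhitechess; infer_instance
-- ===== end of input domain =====

-- B builds each expected chessboard row as a repeated-and-truncated pattern string (seed flipped per row)
-- and zips the input row against it; equivalence with A's toggled-state scan is exact and total.

-- ===== PORT A =====
-- inner loop of A: fold over the row's characters threading (white, current_color)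
def MakeWhitechess (A : List String) : List (List Int) :=
  ((PySem.List.enumerate A).foldl (fun whitechess iv =>
    let index := iv.1
    let rowstring := iv.2
    let current_color : Char := if index % 2 == 0 then 'W' else 'B'
    let st := rowstring.toList.foldl (fun (st : List Int × Char) value =>
      (st.1 ++ [if value == st.2 then (0 : Int) else 1],
       if st.2 == 'W' then 'B' else 'W')) (([] : List Int), current_color)
    whitechess ++ [st.1]) ([] : List (List Int)))

-- ===== PORT B =====
-- fold over rows threading (out, seed); 'seed * (len//2+1)' is flatten∘replicate, '[:len]' is take
-- (exact: the slice bound equals the row length, which is ≥ 0), 'seed[::-1]' is reverse.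
def MakeWhitechess_alt (A : List String) : List (List Int) :=
  (A.foldl (fun (st : List (List Int) × List Char) row =>
    let cs := row.toList
    let pat := (List.flatten (List.replicate (cs.length / 2 + 1) st.2)).take cs.length
    (st.1 ++ [(cs.zip pat).map (fun p => if p.1 ≠ p.2 then (1 : Int) else 0)], st.2.reverse))
    (([] : List (List Int)), ['W', 'B'])).1

-- ===== PRECONDITION & SPEC =====
def Spec_MakeWhitechess (A : List String) (out : List (List Int)) : Prop := out = MakeWhitechess_alt A
instance (A : List String) (out : List (List Int)) : Decidable (Spec_MakeWhitechess A out) := by unfold Spec_MakeWhitechess; infer_instance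

-- ===== CLAIM (what is proved, stated in full; the proofs are below) =====
def Claim_equal_MakeWhitechess : Prop := ∀ (A : List String), Dom_MakeWhitechess A → Spec_MakeWhitechess A (MakeWhitechess A)

-- ===== LEMMAS AND PROOFS =====

-- the parity color, and the canonical per-row result both sides are reduced to
def pvColor (n : Int) : Char := if n % 2 == 0 then 'W' else 'B'

def pvRowCanon (i : Int) (cs : List Char) : List Int :=
  (PySem.List.enumerate cs i).map (fun jc => if jc.2 == pvColor jc.1 then (0 : Int) else 1)

theorem pvColor_toggle (n : Int) :
    (if pvColor n == 'W' then 'B' else 'W') = pvColor (n + 1) := by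
  unfold pvColor
  rcases Int.emod_two_eq_zero_or_one n with h | h <;>
    rcases Int.emod_two_eq_zero_or_one (n + 1) with h' | h' <;>
      simp [h, h'] <;> omega

theorem pvColor_add (i : Int) (j : Nat) :
    pvColor (i + j) = if j % 2 == 0 then pvColor i else pvColor (i + 1) := by
  unfold pvColor
  rcases Int.emod_two_eq_zero_or_one i with h | h <;>
    rcases Nat.mod_two_eq_zero_or_one j with h' | h' <;>
      rcases Int.emod_two_eq_zero_or_one (i + j) with h'' | h'' <;>
        simp [h, h', h''] <;> omega

-- A's inner fold computes pvRowCanon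
theorem pvInner (cs : List Char) (n : Int) (acc : List Int) :
    (cs.foldl (fun (st : List Int × Char) value =>
      (st.1 ++ [if value == st.2 then (0 : Int) else 1],
       if st.2 == 'W' then 'B' else 'W')) (acc, pvColor n)).1
    = acc ++ pvRowCanon n cs := by
  induction cs generalizing n acc with
  | nil => simp [pvRowCanon, PySem.List.enumerate_nil]
  | cons c cs ih =>
      simp only [List.foldl_cons, pvRowCanon, PySem.List.enumerate_cons, List.map_cons]
      rw [pvColor_toggle, ih]
      simp [pvRowCanon]

theorem pvFoldA (l : List (Int × String)) (acc : List (List Int)) :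
    (l.foldl (fun whitechess iv =>
      let index := iv.1
      let rowstring := iv.2
      let current_color : Char := if index % 2 == 0 then 'W' else 'B'
      let st := rowstring.toList.foldl (fun (st : List Int × Char) value =>
        (st.1 ++ [if value == st.2 then (0 : Int) else 1],
         if st.2 == 'W' then 'B' else 'W')) (([] : List Int), current_color)
      whitechess ++ [st.1]) acc)
    = acc ++ l.map (fun ir => pvRowCanon ir.1 ir.2.toList) := by
  induction l generalizing acc with
  | nil => simp
  | cons p l ih =>
      simp only [List.foldl_cons, List.map_cons, ih]
      have h : (if p.1 % 2 == 0 then 'W' else 'B') = pvColor p.1 := rfl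
      rw [h, pvInner p.2.toList p.1 []]
      simp

-- element j of the repeated 2-char pattern
theorem pvFlatRep (a b : Char) (k j : Nat) (h : j < 2 * k) :
    (List.flatten (List.replicate k [a, b]))[j]'(by simp; omega)
      = if j % 2 == 0 then a else b := by
  induction k generalizing j with
  | zero => omega
  | succ k ih =>
      match j with
      | 0 => simp [List.replicate_succ]
      | 1 => simp [List.replicate_succ]
      | j + 2 =>
          have hj : j < 2 * k := by omega
          have : (List.flatten (List.replicate (k+1) [a, b])) = a :: b :: List.flatten (List.replicate k [a, b]) := by
            simp [List.replicate_succ]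
          simp only [this]
          simp only [List.getElem_cons_succ]
          rw [ih j hj]
          have : (j + 2) % 2 = j % 2 := by omega
          rw [this]

-- B's zip-against-pattern row equals pvRowCanon
theorem pvRowB (cs : List Char) (i : Int) :
    ((cs.zip ((List.flatten (List.replicate (cs.length / 2 + 1) [pvColor i, pvColor (i + 1)])).take cs.length)).map
      (fun p => if p.1 ≠ p.2 then (1 : Int) else 0))
    = pvRowCanon i cs := by
  have hlen : cs.length ≤ (List.flatten (List.replicate (cs.length / 2 + 1) [pvColor i, pvColor (i + 1)])).length := by
    simp; omega
  apply List.ext_getElem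
  · simp [pvRowCanon, PySem.List.length_enumerate]; omega
  · intro j h1 h2
    have hj : j < cs.length := by
      simp at h1; omega
    have hjj : j < 2 * (cs.length / 2 + 1) := by omega
    simp only [List.getElem_map, List.getElem_zip, List.getElem_take, pvRowCanon,
      PySem.List.getElem_enumerate]
    rw [pvFlatRep _ _ _ _ hjj, pvColor_add i j]
    by_cases hc : cs[j] = (if j % 2 == 0 then pvColor i else pvColor (i + 1)) <;>
      simp [hc]

theorem pvFoldB (rows : List String) (i : Int) (acc : List (List Int)) :
    (rows.foldl (fun (st : List (List Int) × List Char) row =>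
      let cs := row.toList
      let pat := (List.flatten (List.replicate (cs.length / 2 + 1) st.2)).take cs.length
      (st.1 ++ [(cs.zip pat).map (fun p => if p.1 ≠ p.2 then (1 : Int) else 0)], st.2.reverse))
      (acc, [pvColor i, pvColor (i + 1)])).1
    = acc ++ (PySem.List.enumerate rows i).map (fun ir => pvRowCanon ir.1 ir.2.toList) := by
  induction rows generalizing i acc with
  | nil => simp [PySem.List.enumerate_nil]
  | cons row rest ih =>
      simp only [List.foldl_cons, PySem.List.enumerate_cons, List.map_cons]
      have hrev : ([pvColor i, pvColor (i + 1)]).reverse = [pvColor (i + 1), pvColor (i + 1 + 1)] := by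
        have : pvColor (i + 1 + 1) = pvColor i := by
          unfold pvColor
          rcases Int.emod_two_eq_zero_or_one i with h | h <;>
            rcases Int.emod_two_eq_zero_or_one (i + 1 + 1) with h' | h' <;>
              simp [h, h'] <;> omega
        simp [this]
      simp only [hrev]
      rw [ih (i + 1)]
      rw [pvRowB row.toList i]
      simp

-- ===== VERDICT (by name: the statement is the Claim_ definition above) =====
theorem MakeWhitechess_spec : Claim_equal_MakeWhitechess := by
  intro A _
  show MakeWhitechess A = MakeWhitechess_alt A
  unfold MakeWhitechess MakeWhitechess_alt
  rw [pvFoldA]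
  have h0 : (['W', 'B'] : List Char) = [pvColor 0, pvColor (0 + 1)] := by decide
  rw [h0, pvFoldB A 0 []]
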